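-- pv_equiv track=rewrite | github.com/ecavan/FeynmanAPI | feynman_engine/amplitudes/hadronic.py | _detect_partonic_theory
-- ===== SOURCE A (Python) =====
-- def _detect_partonic_theory(final_state: str) -> str:
--     """Pick a sensible default theory for the partonic |M̄|² lookup.
--
--     Pure-EW final states → ``EW``; anything mixing strong/EM partons
--     with leptons or photons → ``QCDQED``; otherwise ``QCD``.
--     """
--     leptons = {"e+", "e-", "mu+", "mu-", "tau+", "tau-", "nu", "nu~"}
--     bosons_ew = {"W+", "W-", "Z", "H"}
--     tokens = [t for t in final_state.split() if t]
--
--     has_lepton = any(t in leptons for t in tokens)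
--     has_ew_boson = any(t in bosons_ew for t in tokens)
--     has_photon = any(t == "gamma" for t in tokens)
--     has_quark = any(t.replace("~", "") in {"u", "d", "s", "c", "b", "t"}
--                     for t in tokens)
--     has_gluon = any(t == "g" for t in tokens)
--
--     if has_ew_boson:
--         return "EW"
--     if has_lepton:
--         return "EW" if not (has_quark or has_gluon) else "QCDQED"
--     if has_photon and has_quark:
--         return "QCDQED"
--     return "QCD"
-- ===== SOURCE B (Python) =====
-- def _detect_partonic_theory(final_state: str) -> str:
--     """Single-pass classifier: tag each token once, then apply the priority rules."""
--     seen = set()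
--     for t in final_state.split():
--         if not t:
--             continue
--         if t in {"W+", "W-", "Z", "H"}:
--             seen.add("ewboson")
--         elif t in {"e+", "e-", "mu+", "mu-", "tau+", "tau-", "nu", "nu~"}:
--             seen.add("lepton")
--         elif t == "gamma":
--             seen.add("photon")
--         elif t == "g":
--             seen.add("gluon")
--         elif t.replace("~", "") in {"u", "d", "s", "c", "b", "t"}:
--             seen.add("quark")
--     if "ewboson" in seen:
--         return "EW"
--     if "lepton" in seen:
--         return "QCDQED" if ("quark" in seen or "gluon" in seen) else "EW"
--     if "photon" in seen and "quark" in seen: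
--         return "QCDQED"
--     return "QCD"
-- ===== Notes on version B (the rewrite author's own statement) =====
-- stated objective: alternative
-- what changed: Replaces the five independent any() scans over the token list with a single pass that classifies each token into at most one category collected into a set, then applies the same priority decision; correctness relies on the category token-sets being pairwise disjoint.
import Mathlib
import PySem

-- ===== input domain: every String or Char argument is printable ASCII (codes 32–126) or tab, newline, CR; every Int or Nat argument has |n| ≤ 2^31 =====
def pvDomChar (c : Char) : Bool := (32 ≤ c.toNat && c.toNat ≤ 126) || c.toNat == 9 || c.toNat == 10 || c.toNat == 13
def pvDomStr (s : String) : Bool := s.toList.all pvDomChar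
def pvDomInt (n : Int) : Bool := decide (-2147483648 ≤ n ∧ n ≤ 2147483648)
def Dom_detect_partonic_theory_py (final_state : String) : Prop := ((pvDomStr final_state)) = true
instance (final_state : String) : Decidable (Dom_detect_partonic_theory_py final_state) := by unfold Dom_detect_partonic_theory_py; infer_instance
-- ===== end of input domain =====

-- B replaces five independent any() scans with one classifying pass into a 'seen' set; same decision rules (objective: alternative).

-- ===== PORT A =====
def pvLeptons : PySem.Set String := PySem.Set.ofList ["e+", "e-", "mu+", "mu-", "tau+", "tau-", "nu", "nu~"]
def pvBosonsEW : PySem.Set String := PySem.Set.ofList ["W+", "W-", "Z", "H"]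
def pvQuarks : PySem.Set String := PySem.Set.ofList ["u", "d", "s", "c", "b", "t"]

def detect_partonic_theory_py (final_state : String) : String :=
  let tokens := (PySem.Str.split₀ final_state).filter (fun t => t ≠ "")
  let has_lepton := tokens.any (fun t => PySem.Set.contains pvLeptons t)
  let has_ew_boson := tokens.any (fun t => PySem.Set.contains pvBosonsEW t)
  let has_photon := tokens.any (fun t => t == "gamma")
  let has_quark := tokens.any (fun t => PySem.Set.contains pvQuarks (PySem.Str.replace t "~" ""))
  let has_gluon := tokens.any (fun t => t == "g")
  if has_ew_boson then "EW"
  else if has_lepton then (if !(has_quark || has_gluon) then "EW" else "QCDQED")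
  else if has_photon && has_quark then "QCDQED"
  else "QCD"

-- ===== PORT B =====
-- one classifying step of B's loop (the elif chain)
def pvClassifyStep (seen : PySem.Set String) (t : String) : PySem.Set String :=
  if t = "" then seen
  else if PySem.Set.contains pvBosonsEW t then PySem.Set.add seen "ewboson"
  else if PySem.Set.contains pvLeptons t then PySem.Set.add seen "lepton"
  else if t = "gamma" then PySem.Set.add seen "photon"
  else if t = "g" then PySem.Set.add seen "gluon"
  else if PySem.Set.contains pvQuarks (PySem.Str.replace t "~" "") then PySem.Set.add seen "quark"
  else seen

def detect_partonic_theory_py_alt (final_state : String) : String :=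
  let seen := (PySem.Str.split₀ final_state).foldl pvClassifyStep PySem.Set.empty
  if PySem.Set.contains seen "ewboson" then "EW"
  else if PySem.Set.contains seen "lepton" then
    (if PySem.Set.contains seen "quark" || PySem.Set.contains seen "gluon" then "QCDQED" else "EW")
  else if PySem.Set.contains seen "photon" && PySem.Set.contains seen "quark" then "QCDQED"
  else "QCD"

-- ===== PRECONDITION & SPEC =====
def Spec_detect_partonic_theory_py (final_state : String) (out : String) : Prop := out = detect_partonic_theory_py_alt final_state
instance (final_state : String) (out : String) : Decidable (Spec_detect_partonic_theory_py final_state out) := by unfold Spec_detect_partonic_theory_py; infer_instance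

-- ===== CLAIM (what is proved, stated in full; the proofs are below) =====
def Claim_equal_detect_partonic_theory_py : Prop := ∀ (final_state : String), Dom_detect_partonic_theory_py final_state → Spec_detect_partonic_theory_py final_state (detect_partonic_theory_py final_state)

-- ===== LEMMAS AND PROOFS =====

-- the category B's elif chain assigns to a token
def pvTagOf (t : String) : Option String :=
  if t = "" then none
  else if PySem.Set.contains pvBosonsEW t then some "ewboson"
  else if PySem.Set.contains pvLeptons t then some "lepton"
  else if t = "gamma" then some "photon"
  else if t = "g" then some "gluon"
  else if PySem.Set.contains pvQuarks (PySem.Str.replace t "~" "") then some "quark"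
  else none

theorem pvClassifyStep_eq (seen : PySem.Set String) (t : String) :
    pvClassifyStep seen t = match pvTagOf t with
      | some tag => PySem.Set.add seen tag
      | none => seen := by
  unfold pvClassifyStep pvTagOf
  split_ifs <;> rfl

theorem contains_add (s : PySem.Set String) (x y : String) :
    PySem.Set.contains (PySem.Set.add s x) y = (PySem.Set.contains s y || x == y) := by
  by_cases h1 : y ∈ s <;> by_cases h2 : x = y
  · simp [PySem.Set.contains, h1, h2]
  · simp [PySem.Set.contains, PySem.Set.mem_add, h1]
  · subst h2; simp [PySem.Set.contains, PySem.Set.mem_add, h1]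
  · simp [PySem.Set.contains, PySem.Set.mem_add, h1, Ne.symm h2, h2]

theorem foldl_contains (ts : List String) (s : PySem.Set String) (tag : String) :
    PySem.Set.contains (ts.foldl pvClassifyStep s) tag
      = (PySem.Set.contains s tag || ts.any (fun t => pvTagOf t == some tag)) := by
  induction ts generalizing s with
  | nil => simp
  | cons t ts ih =>
    rw [List.foldl_cons, List.any_cons, ih, pvClassifyStep_eq]
    cases h : pvTagOf t with
    | none => simp [Bool.or_assoc]
    | some tg =>
      have hbe : (decide (tag = tg)) = (tg == tag) := by
        by_cases h' : tag = tg
        · subst h'; simp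
        · have h'' := Ne.symm h'; simp [h', h'']
      simp [contains_add, Bool.or_assoc, hbe]

theorem bosons_eq : pvBosonsEW = ["W+", "W-", "Z", "H"] := by decide
theorem leptons_eq : pvLeptons = ["e+", "e-", "mu+", "mu-", "tau+", "tau-", "nu", "nu~"] := by decide
theorem quarks_eq : pvQuarks = ["u", "d", "s", "c", "b", "t"] := by decide

theorem tag_ewboson (t : String) :
    (pvTagOf t == some "ewboson") = PySem.Set.contains pvBosonsEW t := by
  unfold pvTagOf
  split_ifs with h1 <;> simp_all [PySem.Set.contains, bosons_eq] <;> intro h <;> subst h <;> simp_all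

theorem tag_lepton (t : String) :
    (pvTagOf t == some "lepton") = PySem.Set.contains pvLeptons t := by
  unfold pvTagOf
  split_ifs with h1 h2 <;> simp_all [PySem.Set.contains, bosons_eq, leptons_eq] <;>
    first
      | (intro h; subst h; simp_all)
      | (rcases h2 with h | h | h | h <;> subst h <;> decide)

theorem tag_photon (t : String) :
    (pvTagOf t == some "photon") = (t == "gamma") := by
  unfold pvTagOf
  split_ifs with h1 h2 h3 <;> simp_all [PySem.Set.contains, bosons_eq, leptons_eq] <;>
    first
      | (rcases h2 with h | h | h | h <;> subst h <;> decide)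
      | (rcases h3 with h | h | h | h | h | h | h | h <;> subst h <;> decide)

theorem tag_gluon (t : String) :
    (pvTagOf t == some "gluon") = (t == "g") := by
  unfold pvTagOf
  split_ifs with h1 h2 h3 h4 <;> simp_all [PySem.Set.contains, bosons_eq, leptons_eq] <;>
    first
      | (rcases h2 with h | h | h | h <;> subst h <;> decide)
      | (rcases h3 with h | h | h | h | h | h | h | h <;> subst h <;> decide)

theorem tag_quark (t : String) :
    (pvTagOf t == some "quark") = PySem.Set.contains pvQuarks (PySem.Str.replace t "~" "") := by
  unfold pvTagOf
  split_ifs with h1 h2 h3 h4 h5 <;>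
    simp_all [PySem.Set.contains, bosons_eq, leptons_eq, quarks_eq]
  · subst h1; decide
  · rcases h2 with h | h | h | h <;> subst h <;> decide
  · rcases h3 with h | h | h | h | h | h | h | h <;> subst h <;> decide
  · subst h4; decide
  · subst h5; decide

theorem guard_ewboson (t : String) :
    (decide (t ≠ "") && PySem.Set.contains pvBosonsEW t) = (pvTagOf t == some "ewboson") := by
  by_cases h : t = ""
  · subst h; decide
  · simp [h, tag_ewboson]

theorem guard_lepton (t : String) :
    (decide (t ≠ "") && PySem.Set.contains pvLeptons t) = (pvTagOf t == some "lepton") := by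
  by_cases h : t = ""
  · subst h; decide
  · simp [h, tag_lepton]

theorem guard_photon (t : String) :
    (decide (t ≠ "") && (t == "gamma")) = (pvTagOf t == some "photon") := by
  by_cases h : t = ""
  · subst h; decide
  · simp [h, tag_photon]

theorem guard_gluon (t : String) :
    (decide (t ≠ "") && (t == "g")) = (pvTagOf t == some "gluon") := by
  by_cases h : t = ""
  · subst h; decide
  · simp [h, tag_gluon]

theorem guard_quark (t : String) :
    (decide (t ≠ "") && PySem.Set.contains pvQuarks (PySem.Str.replace t "~" "")) = (pvTagOf t == some "quark") := by
  by_cases h : t = ""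
  · subst h; decide
  · simp [h, tag_quark]

-- ===== VERDICT (by name: the statement is the Claim_ definition above) =====
theorem detect_partonic_theory_py_spec : Claim_equal_detect_partonic_theory_py := by
  intro fs _
  unfold Spec_detect_partonic_theory_py detect_partonic_theory_py detect_partonic_theory_py_alt
  simp only [List.any_filter, foldl_contains, guard_ewboson, guard_lepton, guard_photon,
    guard_gluon, guard_quark]
  have hempty : ∀ tag : String, PySem.Set.contains PySem.Set.empty tag = false := by
    intro tag; rfl
  simp only [hempty, Bool.false_or]
  split_ifs <;> simp_all
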